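-- pv_equiv track=rewrite | github.com/FriedStan/PSCP | solar_system.py | right_left_sun
-- ===== SOURCE A (Python) =====
-- def right_left_sun(sun_pos, text_seq, text_seq_rev):
--     """If the Sun is in the right"""
--     hottest, coolest = "", ""
--     count = 0
--     for things in text_seq_rev:
--         if things == "|":
--             count += 1
--             if count >= 3:
--                 break
--         elif count == 2:
--             if sun_pos == "right":
--                 hottest += things
--             else:
--                 coolest += things
--     count = 0
--     for things in text_seq:
--         if things == "|":
--             count += 1
--             if count >= 2:
--                 break
--         elif count <= 1:
--             if sun_pos == "right":
--                 coolest += things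
--             else:
--                 hottest += things
--     return hottest[::-1], coolest
-- ===== SOURCE B (Python) =====
-- def right_left_sun(sun_pos, text_seq, text_seq_rev):
--     """If the Sun is in the right -- via split('|') fields instead of char-by-char loops."""
--     fwd = text_seq.split('|')
--     rev = text_seq_rev.split('|')
--     seg_fwd = ''.join(fwd[:2])
--     seg_rev = rev[2] if len(rev) >= 3 else ''
--     if sun_pos == 'right':
--         hottest, coolest = seg_rev, seg_fwd
--     else:
--         hottest, coolest = seg_fwd, seg_rev
--     return hottest[::-1], coolest
-- ===== Notes on version B (the rewrite author's own statement) =====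
-- stated objective: simpler
-- what changed: Replaces A's two character-by-character counting loops (with break and per-char string appends) by split('|') field selection: join of the first two forward fields and the third reverse field.
import Mathlib
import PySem

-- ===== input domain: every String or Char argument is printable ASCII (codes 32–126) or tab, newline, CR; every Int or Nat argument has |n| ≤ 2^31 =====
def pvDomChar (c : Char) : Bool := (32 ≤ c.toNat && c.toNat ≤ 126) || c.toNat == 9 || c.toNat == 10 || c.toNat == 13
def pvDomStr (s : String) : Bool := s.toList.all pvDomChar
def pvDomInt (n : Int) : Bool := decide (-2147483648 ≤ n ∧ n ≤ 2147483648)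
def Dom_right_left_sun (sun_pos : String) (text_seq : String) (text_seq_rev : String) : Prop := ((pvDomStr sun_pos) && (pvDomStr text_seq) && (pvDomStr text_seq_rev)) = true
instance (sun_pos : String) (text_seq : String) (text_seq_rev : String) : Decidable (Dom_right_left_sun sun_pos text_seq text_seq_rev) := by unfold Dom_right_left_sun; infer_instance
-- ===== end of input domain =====

-- B replaces A's two char-by-char counting loops by split('|') field selection (objective: simpler).

-- ===== PORT A =====
-- first loop of A (over text_seq_rev): collect between the 2nd and 3rd '|'
def pvLoopRev (sun_pos : String) : List Char → List Char → List Char → Nat → List Char × List Char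
  | [], hottest, coolest, _count => (hottest, coolest)
  | t :: ts, hottest, coolest, count =>
    if t = '|' then
      if count + 1 ≥ 3 then (hottest, coolest)
      else pvLoopRev sun_pos ts hottest coolest (count + 1)
    else
      if count = 2 then
        if sun_pos = "right" then pvLoopRev sun_pos ts (hottest ++ [t]) coolest count
        else pvLoopRev sun_pos ts hottest (coolest ++ [t]) count
      else pvLoopRev sun_pos ts hottest coolest count

-- second loop of A (over text_seq): collect non-'|' chars before the 2nd '|'
def pvLoopFwd (sun_pos : String) : List Char → List Char → List Char → Nat → List Char × List Char
  | [], hottest, coolest, _count => (hottest, coolest)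
  | t :: ts, hottest, coolest, count =>
    if t = '|' then
      if count + 1 ≥ 2 then (hottest, coolest)
      else pvLoopFwd sun_pos ts hottest coolest (count + 1)
    else
      if count ≤ 1 then
        if sun_pos = "right" then pvLoopFwd sun_pos ts hottest (coolest ++ [t]) count
        else pvLoopFwd sun_pos ts (hottest ++ [t]) coolest count
      else pvLoopFwd sun_pos ts hottest coolest count

def right_left_sun (sun_pos : String) (text_seq : String) (text_seq_rev : String) : String × String :=
  let p1 := pvLoopRev sun_pos text_seq_rev.toList [] [] 0
  let p2 := pvLoopFwd sun_pos text_seq.toList p1.1 p1.2 0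
  -- hottest[::-1] is string reversal (PySem.Str.slice?_none_none_neg_one)
  (String.ofList p2.1.reverse, String.ofList p2.2)

-- ===== PORT B =====
def right_left_sun_alt (sun_pos : String) (text_seq : String) (text_seq_rev : String) : String × String :=
  let fwd := PySem.Chars.splitOn text_seq.toList ['|']          -- text_seq.split('|')
  let rev := PySem.Chars.splitOn text_seq_rev.toList ['|']      -- text_seq_rev.split('|')
  let segFwd := PySem.Chars.join [] (fwd.take 2)                -- ''.join(fwd[:2])
  let segRev := if 3 ≤ rev.length then rev.getD 2 [] else []    -- rev[2] if len(rev) >= 3 else ''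
  if sun_pos = "right" then (String.ofList segRev.reverse, String.ofList segFwd)
  else (String.ofList segFwd.reverse, String.ofList segRev)

-- ===== PRECONDITION & SPEC =====
def Spec_right_left_sun (sun_pos : String) (text_seq : String) (text_seq_rev : String) (out : String × String) : Prop := out = right_left_sun_alt sun_pos text_seq text_seq_rev
instance (sun_pos : String) (text_seq : String) (text_seq_rev : String) (out : String × String) : Decidable (Spec_right_left_sun sun_pos text_seq text_seq_rev out) := by unfold Spec_right_left_sun; infer_instance

-- ===== CLAIM (what is proved, stated in full; the proofs are below) =====
def Claim_equal_right_left_sun : Prop := ∀ (sun_pos : String) (text_seq : String) (text_seq_rev : String), Dom_right_left_sun sun_pos text_seq text_seq_rev → Spec_right_left_sun sun_pos text_seq text_seq_rev (right_left_sun sun_pos text_seq text_seq_rev)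

-- ===== LEMMAS AND PROOFS =====

-- simple structural split on '|' (proof-side model of PySem.Chars.splitOn · ['|'])
def pvSp : List Char → List (List Char)
  | [] => [[]]
  | c :: rest =>
    if c = '|' then [] :: pvSp rest
    else match pvSp rest with
      | p :: ps => (c :: p) :: ps
      | [] => [[c]]

theorem pvSp_ne_nil (l : List Char) : pvSp l ≠ [] := by
  cases l with
  | nil => simp [pvSp]
  | cons c rest =>
    simp only [pvSp]
    split_ifs
    · simp
    · cases h : pvSp rest <;> simp

theorem pvSp_head (l : List Char) : (pvSp l).headI = l.takeWhile (· ≠ '|') := by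
  induction l with
  | nil => simp [pvSp]
  | cons c rest ih =>
    by_cases hc : c = '|'
    · simp [pvSp, hc]
    · cases h : pvSp rest with
      | nil => exact absurd h (pvSp_ne_nil rest)
      | cons p ps =>
        rw [h] at ih
        simp only [List.headI] at ih
        simp [pvSp, hc, h, ih]

theorem pv_go_eq (fuel : Nat) : ∀ (l cur : List Char) (acc : List (List Char)), l.length ≤ fuel →
    PySem.Chars.splitOn.go ['|'] fuel l cur acc
      = acc.reverse ++ (cur.reverse ++ (pvSp l).headI) :: (pvSp l).tail := by
  induction fuel with
  | zero =>
    intro l cur acc h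
    have : l = [] := by cases l <;> simp_all
    subst this
    simp [PySem.Chars.splitOn.go, pvSp]
  | succ n ih =>
    intro l cur acc h
    cases l with
    | nil => simp [PySem.Chars.splitOn.go, pvSp]
    | cons c rest =>
      by_cases hc : c = '|'
      · subst hc
        have hpre : List.isPrefixOf ['|'] ('|' :: rest) = true := by simp [List.isPrefixOf]
        rw [PySem.Chars.splitOn.go, if_pos hpre]
        have hd : List.drop ['|'].length ('|' :: rest) = rest := rfl
        rw [hd, ih rest [] (cur.reverse :: acc) (by simp at h; omega)]
        cases hr : pvSp rest with
        | nil => exact absurd hr (pvSp_ne_nil rest)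
        | cons p ps => simp [pvSp, hr]
      · have hpre : List.isPrefixOf ['|'] (c :: rest) = false := by
          simp [List.isPrefixOf]; exact fun hh => hc hh.symm
        rw [PySem.Chars.splitOn.go, if_neg (by simp [hpre])]
        rw [ih rest (c :: cur) acc (by simp at h; omega)]
        cases hr : pvSp rest with
        | nil => exact absurd hr (pvSp_ne_nil rest)
        | cons p ps => simp [pvSp, hc, hr]

theorem pv_splitOn_eq (l : List Char) : PySem.Chars.splitOn l ['|'] = pvSp l := by
  unfold PySem.Chars.splitOn
  rw [pv_go_eq (l.length + 1) l [] [] (by omega)]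
  cases hr : pvSp l with
  | nil => exact absurd hr (pvSp_ne_nil l)
  | cons p ps => simp

-- the values B computes from the forward/reverse split
def pvSegF (cs : List Char) : List Char := PySem.Chars.join [] ((pvSp cs).take 2)
def pvSegR (cs : List Char) : List Char := (pvSp cs).getD 2 []

theorem pvLoopFwd_one (sp : String) (cs : List Char) : ∀ (h c : List Char),
    pvLoopFwd sp cs h c 1
      = if sp = "right" then (h, c ++ cs.takeWhile (· ≠ '|')) else (h ++ cs.takeWhile (· ≠ '|'), c) := by
  induction cs with
  | nil => intro h c; simp [pvLoopFwd]
  | cons t ts ih =>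
    intro h c
    by_cases ht : t = '|'
    · subst ht; simp [pvLoopFwd]
    · rw [show pvLoopFwd sp (t :: ts) h c 1
            = (if sp = "right" then pvLoopFwd sp ts h (c ++ [t]) 1 else pvLoopFwd sp ts (h ++ [t]) c 1)
          from by simp [pvLoopFwd, ht]]
      by_cases hs : sp = "right"
      · subst hs; simp [ih, ht]
      · simp [hs, ih, ht]

theorem pvLoopFwd_zero (sp : String) (cs : List Char) : ∀ (h c : List Char),
    pvLoopFwd sp cs h c 0
      = if sp = "right" then (h, c ++ pvSegF cs) else (h ++ pvSegF cs, c) := by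
  induction cs with
  | nil =>
    intro h c
    simp [pvLoopFwd, pvSegF, pvSp, PySem.Chars.join, List.intercalate]
  | cons t ts ih =>
    intro h c
    by_cases ht : t = '|'
    · subst ht
      rw [show pvLoopFwd sp ('|' :: ts) h c 0 = pvLoopFwd sp ts h c 1 from by simp [pvLoopFwd]]
      rw [pvLoopFwd_one]
      have hseg : pvSegF ('|' :: ts) = ts.takeWhile (· ≠ '|') := by
        have hh := pvSp_head ts
        cases hr : pvSp ts with
        | nil => exact absurd hr (pvSp_ne_nil ts)
        | cons p ps =>
          rw [hr] at hh
          cases ps <;> simp [pvSegF, pvSp, hr, PySem.Chars.join, List.intercalate] <;> simpa using hh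
      rw [hseg]
    · rw [show pvLoopFwd sp (t :: ts) h c 0
            = (if sp = "right" then pvLoopFwd sp ts h (c ++ [t]) 0 else pvLoopFwd sp ts (h ++ [t]) c 0)
          from by simp [pvLoopFwd, ht]]
      have hseg : pvSegF (t :: ts) = t :: pvSegF ts := by
        cases hr : pvSp ts with
        | nil => exact absurd hr (pvSp_ne_nil ts)
        | cons p ps => cases ps <;> simp [pvSegF, pvSp, ht, hr, PySem.Chars.join, List.intercalate]
      by_cases hs : sp = "right"
      · subst hs; simp [ih, hseg]
      · simp [hs, ih, hseg]

theorem pvLoopRev_two (sp : String) (cs : List Char) : ∀ (h c : List Char),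
    pvLoopRev sp cs h c 2
      = if sp = "right" then (h ++ cs.takeWhile (· ≠ '|'), c) else (h, c ++ cs.takeWhile (· ≠ '|')) := by
  induction cs with
  | nil => intro h c; simp [pvLoopRev]
  | cons t ts ih =>
    intro h c
    by_cases ht : t = '|'
    · subst ht; simp [pvLoopRev]
    · rw [show pvLoopRev sp (t :: ts) h c 2
            = (if sp = "right" then pvLoopRev sp ts (h ++ [t]) c 2 else pvLoopRev sp ts h (c ++ [t]) 2)
          from by simp [pvLoopRev, ht]]
      by_cases hs : sp = "right"
      · subst hs; simp [ih, ht]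
      · simp [hs, ih, ht]

theorem pvLoopRev_one (sp : String) (cs : List Char) : ∀ (h c : List Char),
    pvLoopRev sp cs h c 1
      = if sp = "right" then (h ++ (pvSp cs).getD 1 [], c) else (h, c ++ (pvSp cs).getD 1 []) := by
  induction cs with
  | nil => intro h c; simp [pvLoopRev, pvSp]
  | cons t ts ih =>
    intro h c
    by_cases ht : t = '|'
    · subst ht
      rw [show pvLoopRev sp ('|' :: ts) h c 1 = pvLoopRev sp ts h c 2 from by simp [pvLoopRev]]
      rw [pvLoopRev_two]
      have hg : (pvSp ('|' :: ts)).getD 1 [] = ts.takeWhile (· ≠ '|') := by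
        have hh := pvSp_head ts
        cases hr : pvSp ts with
        | nil => exact absurd hr (pvSp_ne_nil ts)
        | cons p ps => rw [hr] at hh; simp [pvSp, hr]; simpa using hh
      rw [hg]
    · rw [show pvLoopRev sp (t :: ts) h c 1 = pvLoopRev sp ts h c 1 from by simp [pvLoopRev, ht]]
      have hg : (pvSp (t :: ts)).getD 1 [] = (pvSp ts).getD 1 [] := by
        cases hr : pvSp ts with
        | nil => exact absurd hr (pvSp_ne_nil ts)
        | cons p ps => simp [pvSp, ht, hr]
      rw [hg, ih]

theorem pvLoopRev_zero (sp : String) (cs : List Char) : ∀ (h c : List Char),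
    pvLoopRev sp cs h c 0
      = if sp = "right" then (h ++ pvSegR cs, c) else (h, c ++ pvSegR cs) := by
  induction cs with
  | nil => intro h c; simp [pvLoopRev, pvSegR, pvSp]
  | cons t ts ih =>
    intro h c
    by_cases ht : t = '|'
    · subst ht
      rw [show pvLoopRev sp ('|' :: ts) h c 0 = pvLoopRev sp ts h c 1 from by simp [pvLoopRev]]
      rw [pvLoopRev_one]
      have hg : pvSegR ('|' :: ts) = (pvSp ts).getD 1 [] := by simp [pvSegR, pvSp]
      rw [hg]
    · rw [show pvLoopRev sp (t :: ts) h c 0 = pvLoopRev sp ts h c 0 from by simp [pvLoopRev, ht]]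
      have hg : pvSegR (t :: ts) = pvSegR ts := by
        cases hr : pvSp ts with
        | nil => exact absurd hr (pvSp_ne_nil ts)
        | cons p ps => simp [pvSegR, pvSp, ht, hr]
      rw [hg, ih]

theorem pv_guard_getD (l : List (List Char)) :
    (if 3 ≤ l.length then l.getD 2 [] else []) = l.getD 2 [] := by
  split_ifs with h
  · rfl
  · rw [List.getD_eq_default]; omega

-- ===== VERDICT (by name: the statement is the Claim_ definition above) =====
theorem right_left_sun_spec : Claim_equal_right_left_sun := by
  unfold Claim_equal_right_left_sun
  intro sp ts tsr _
  unfold Spec_right_left_sun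
  simp only [right_left_sun, right_left_sun_alt]
  rw [pv_splitOn_eq, pv_splitOn_eq, pv_guard_getD, pvLoopRev_zero]
  by_cases hs : sp = "right" <;>
    simp [hs, pvLoopFwd_zero, pvSegF, pvSegR]
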